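-- pv_equiv track=rewrite | github.com/jrnijboer/AdventOfCode | 2023/python/day13.py | isMirrorOnRow
-- ===== SOURCE A (Python) =====
-- def isMirrorOnRow(pattern, allowedErrors=0):
--     for i in range(len(pattern) - 1):
--         errors = 0
--         for col in range(len(pattern[0])):
--             up = "".join([pattern[j][col] for j in range(i, -1, -1)])
--             down = "".join([pattern[j][col] for j in range(i+1, len(pattern))])
--             if not up.startswith(down) and not down.startswith(up):
--                 errors += 1
--         if errors == allowedErrors:
--             return i + 1
--     return 0
-- ===== SOURCE B (Python) =====
-- def isMirrorOnRow(pattern, allowedErrors=0):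
--     n = len(pattern)
--     if n < 2:
--         return 0
--     w = len(pattern[0])
--     for i in range(n - 1):
--         bad = set()
--         for a, b in zip(reversed(pattern[:i+1]), pattern[i+1:]):
--             for c in range(w):
--                 if a[c] != b[c]:
--                     bad.add(c)
--         if len(bad) == allowedErrors:
--             return i + 1
--     return 0
-- ===== Notes on version B (the rewrite author's own statement) =====
-- stated objective: faster
-- what changed: Instead of building, per gap and per column, two vertical strings by join and testing mutual startswith, B walks the mirrored row pairs (zip of reversed top half with bottom half), compares characters row-wise and collects mismatching column indices in a set, counting only the overlap and allocating no strings.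
import Mathlib
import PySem

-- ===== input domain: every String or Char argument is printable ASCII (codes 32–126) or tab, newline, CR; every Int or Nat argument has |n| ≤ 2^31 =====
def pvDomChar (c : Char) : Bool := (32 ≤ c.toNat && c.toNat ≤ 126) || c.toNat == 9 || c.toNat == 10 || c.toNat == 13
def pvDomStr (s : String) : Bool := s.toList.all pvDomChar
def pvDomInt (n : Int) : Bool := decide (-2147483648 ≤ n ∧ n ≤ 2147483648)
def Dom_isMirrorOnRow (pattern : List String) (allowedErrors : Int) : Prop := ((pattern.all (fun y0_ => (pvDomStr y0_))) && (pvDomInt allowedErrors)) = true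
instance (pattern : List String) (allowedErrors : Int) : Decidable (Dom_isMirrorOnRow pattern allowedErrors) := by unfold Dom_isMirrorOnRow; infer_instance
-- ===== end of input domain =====

-- B replaces A's per-gap-per-column vertical string building (join + mutual startswith) by a
-- row-wise sweep over the mirrored row pairs collecting mismatching columns in a set (objective: faster).

-- ===== PORT A =====
-- pattern[j][col] as read by A (defaults only fire outside Pre_, where Python A raises)
def pvColCharA (pattern : List String) (j col : Int) : Char :=
  PySem.List.pyGetD (PySem.List.pyGetD pattern j "").toList col ' '

-- up = "".join(pattern[j][col] for j in range(i, -1, -1)) as a character list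
def pvUpA (pattern : List String) (i col : Int) : List Char :=
  (PySem.List.pyRange i (-1) (-1)).map (fun j => pvColCharA pattern j col)

-- down = "".join(pattern[j][col] for j in range(i+1, len(pattern))) as a character list
def pvDownA (pattern : List String) (i col : Int) : List Char :=
  (PySem.List.pyRange (i + 1) (pattern.length : Int) 1).map (fun j => pvColCharA pattern j col)

-- A's per-column test: not up.startswith(down) and not down.startswith(up)
def pvColErrA (pattern : List String) (i col : Int) : Bool :=
  !(PySem.Chars.startswith (pvUpA pattern i col) (pvDownA pattern i col)) &&
    !(PySem.Chars.startswith (pvDownA pattern i col) (pvUpA pattern i col))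

-- the inner 'for col in range(len(pattern[0]))' loop of A for one candidate gap i
def pvErrorsA (pattern : List String) (i : Int) : Int :=
  (PySem.List.pyRange 0 ((PySem.Str.len (PySem.List.pyGetD pattern 0 "")) : Int) 1).foldl
    (fun errors col => if pvColErrA pattern i col then errors + 1 else errors) 0

-- the outer 'for i in range(len(pattern) - 1)' loop with its early return
def pvGoA (pattern : List String) (allowedErrors : Int) : List Int → Int
  | [] => 0
  | i :: rest =>
      if pvErrorsA pattern i = allowedErrors then i + 1 else pvGoA pattern allowedErrors rest

def isMirrorOnRow (pattern : List String) (allowedErrors : Int) : Int :=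
  pvGoA pattern allowedErrors (PySem.List.pyRange 0 ((pattern.length : Int) - 1) 1)

-- ===== PORT B =====
-- 'bad' after B's 'for a, b in zip(reversed(pattern[:i+1]), pattern[i+1:])' loop
def pvBadB (pattern : List String) (w i : Int) : PySem.Set Int :=
  ((PySem.List.slice pattern none (some (i + 1))).reverse.zip
      (PySem.List.slice pattern (some (i + 1)) none)).foldl
    (fun bad ab =>
      (PySem.List.pyRange 0 w 1).foldl
        (fun bad c =>
          if PySem.List.pyGetD ab.1.toList c ' ' ≠ PySem.List.pyGetD ab.2.toList c ' '
          then PySem.Set.add bad c else bad)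
        bad)
    PySem.Set.empty

def pvGoB (pattern : List String) (allowedErrors w : Int) : List Int → Int
  | [] => 0
  | i :: rest =>
      if ((PySem.Set.len (pvBadB pattern w i) : Int) = allowedErrors) then i + 1
      else pvGoB pattern allowedErrors w rest

def isMirrorOnRow_alt (pattern : List String) (allowedErrors : Int) : Int :=
  if pattern.length < 2 then 0
  else
    pvGoB pattern allowedErrors ((PySem.Str.len (PySem.List.pyGetD pattern 0 "")) : Int)
      (PySem.List.pyRange 0 ((pattern.length : Int) - 1) 1)

-- ===== PRECONDITION & SPEC =====
-- Pre_ excludes exactly the inputs on which Python A raises IndexError: two or more rows with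
-- some row shorter than the first row (A indexes every row at every column of the first row's width).
def Pre_isMirrorOnRow (pattern : List String) (allowedErrors : Int) : Prop :=
  pattern.length ≤ 1 ∨ ∀ s ∈ pattern, pattern.headI.length ≤ s.length

instance (pattern : List String) (allowedErrors : Int) : Decidable (Pre_isMirrorOnRow pattern allowedErrors) := by
  unfold Pre_isMirrorOnRow; infer_instance

def pvWitness_isMirrorOnRow : List String × Int := (["#.#", "#.#", "..#"], 0)

def Spec_isMirrorOnRow (pattern : List String) (allowedErrors : Int) (out : Int) : Prop := out = isMirrorOnRow_alt pattern allowedErrors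
instance (pattern : List String) (allowedErrors : Int) (out : Int) : Decidable (Spec_isMirrorOnRow pattern allowedErrors out) := by unfold Spec_isMirrorOnRow; infer_instance

-- ===== CLAIM (what is proved, stated in full; the proofs are below) =====
def Claim_equal_isMirrorOnRow : Prop := ∀ (pattern : List String) (allowedErrors : Int), Dom_isMirrorOnRow pattern allowedErrors → Pre_isMirrorOnRow pattern allowedErrors → Spec_isMirrorOnRow pattern allowedErrors (isMirrorOnRow pattern allowedErrors)

-- ===== LEMMAS AND PROOFS =====

-- neither list a prefix of the other ↔ they differ at some common index
theorem pv_not_prefix_iff {α : Type} [DecidableEq α] :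
    ∀ (a b : List α), (¬ a <+: b ∧ ¬ b <+: a) ↔ ∃ k, k < min a.length b.length ∧ a[k]? ≠ b[k]? := by
  intro a
  induction a with
  | nil => intro b; simp
  | cons x xs ih =>
    intro b
    cases b with
    | nil => simp
    | cons y ys =>
      simp only [List.cons_prefix_cons, List.length_cons]
      by_cases hxy : x = y
      · subst hxy
        simp only [true_and]
        rw [ih ys]
        constructor
        · rintro ⟨k, hk, hne⟩
          exact ⟨k + 1, by omega, by simpa using hne⟩
        · rintro ⟨k, hk, hne⟩
          cases k with
          | zero => simp at hne
          | succ k => exact ⟨k, by omega, by simpa using hne⟩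
      · constructor
        · intro _
          exact ⟨0, by omega, by simp [hxy]⟩
        · intro _
          constructor
          · rintro ⟨h, _⟩; exact hxy h
          · rintro ⟨h, _⟩; exact hxy h.symm

-- membership through B's inner conditional-add column loop
theorem pv_foldl_addIf_mem (l : List Int) (p : Int → Prop) [DecidablePred p]
    (s : PySem.Set Int) (x : Int) :
    x ∈ l.foldl (fun s c => if p c then PySem.Set.add s c else s) s ↔ x ∈ s ∨ (x ∈ l ∧ p x) := by
  induction l generalizing s with
  | nil => simp
  | cons c cs ih =>
    simp only [List.foldl_cons]
    rw [ih]
    by_cases hc : p c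
    · simp only [if_pos hc, PySem.Set.mem_add, List.mem_cons]
      constructor
      · rintro ((h | rfl) | h) <;> tauto
      · rintro (h | ⟨(rfl | h), hp⟩) <;> tauto
    · simp only [if_neg hc, List.mem_cons]
      constructor
      · rintro (h | h) <;> tauto
      · rintro (h | ⟨(rfl | h), hp⟩) <;> tauto

theorem pv_foldl_addIf_nodup (l : List Int) (p : Int → Prop) [DecidablePred p]
    (s : PySem.Set Int) (h : s.Nodup) :
    (l.foldl (fun s c => if p c then PySem.Set.add s c else s) s).Nodup := by
  induction l generalizing s with
  | nil => simpa
  | cons c cs ih =>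
    simp only [List.foldl_cons]
    apply ih
    by_cases hc : p c
    · simpa [if_pos hc] using PySem.Set.nodup_add (s := s) (x := c) h
    · simpa [if_neg hc] using h

-- membership and nodup for B's whole bad-column set
theorem pv_badB_mem (pattern : List String) (w i x : Int) :
    x ∈ pvBadB pattern w i ↔ x ∈ PySem.List.pyRange 0 w 1 ∧
      ∃ ab ∈ (PySem.List.slice pattern none (some (i + 1))).reverse.zip
        (PySem.List.slice pattern (some (i + 1)) none),
        PySem.List.pyGetD ab.1.toList x ' ' ≠ PySem.List.pyGetD ab.2.toList x ' ' := by
  unfold pvBadB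
  generalize (PySem.List.slice pattern none (some (i + 1))).reverse.zip
    (PySem.List.slice pattern (some (i + 1)) none) = ps
  have main : ∀ (ps : List (String × String)) (s : PySem.Set Int),
      x ∈ ps.foldl (fun bad ab =>
        (PySem.List.pyRange 0 w 1).foldl
          (fun bad c =>
            if PySem.List.pyGetD ab.1.toList c ' ' ≠ PySem.List.pyGetD ab.2.toList c ' '
            then PySem.Set.add bad c else bad) bad) s ↔
      x ∈ s ∨ ∃ ab ∈ ps, x ∈ PySem.List.pyRange 0 w 1 ∧
        PySem.List.pyGetD ab.1.toList x ' ' ≠ PySem.List.pyGetD ab.2.toList x ' ' := by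
    intro ps
    induction ps with
    | nil => simp
    | cons ab abs ih =>
      intro s
      simp only [List.foldl_cons]
      rw [ih, pv_foldl_addIf_mem]
      simp only [List.mem_cons]
      constructor
      · rintro ((h | ⟨h1, h2⟩) | ⟨ab', h1, h2⟩) <;> first
          | exact Or.inl h
          | exact Or.inr ⟨ab, Or.inl rfl, h1, h2⟩
          | exact Or.inr ⟨ab', Or.inr h1, h2⟩
      · rintro (h | ⟨ab', (rfl | h1), h2⟩)
        · exact Or.inl (Or.inl h)
        · exact Or.inl (Or.inr h2)
        · exact Or.inr ⟨ab', h1, h2⟩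
  rw [main ps PySem.Set.empty]
  simp only [PySem.Set.empty]
  simp only [PySem.List.mem_pyRange_one]
  constructor
  · rintro (h | h)
    · simp at h
    · tauto
  · intro h; right; tauto

theorem pv_badB_nodup (pattern : List String) (w i : Int) : (pvBadB pattern w i).Nodup := by
  unfold pvBadB
  generalize (PySem.List.slice pattern none (some (i + 1))).reverse.zip
    (PySem.List.slice pattern (some (i + 1)) none) = ps
  have main : ∀ (ps : List (String × String)) (s : PySem.Set Int), s.Nodup →
      (ps.foldl (fun bad ab =>
        (PySem.List.pyRange 0 w 1).foldl
          (fun bad c =>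
            if PySem.List.pyGetD ab.1.toList c ' ' ≠ PySem.List.pyGetD ab.2.toList c ' '
            then PySem.Set.add bad c else bad) bad) s).Nodup := by
    intro ps
    induction ps with
    | nil => intro s hs; simpa
    | cons ab abs ih =>
      intro s hs
      simp only [List.foldl_cons]
      exact ih _ (pv_foldl_addIf_nodup _ _ _ hs)
  exact main ps PySem.Set.empty (by simp [PySem.Set.empty])

-- the heart: A's per-column test agrees with B's "some mirrored pair differs at this column"
theorem pv_col_iff (pattern : List String) (i col : Int)
    (h0 : 0 ≤ i) (h1 : i < (pattern.length : Int) - 1) :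
    pvColErrA pattern i col = true ↔
      ∃ ab ∈ (PySem.List.slice pattern none (some (i + 1))).reverse.zip
        (PySem.List.slice pattern (some (i + 1)) none),
        PySem.List.pyGetD ab.1.toList col ' ' ≠ PySem.List.pyGetD ab.2.toList col ' ' := by
  have hsw : ∀ s p : List Char, (PySem.Chars.startswith s p = false) ↔ ¬ p <+: s := by
    intro s p
    rw [Bool.eq_false_iff, ne_eq, PySem.Chars.startswith_iff]
  have hA : pvColErrA pattern i col = true ↔
      (¬ (pvDownA pattern i col) <+: (pvUpA pattern i col) ∧
        ¬ (pvUpA pattern i col) <+: (pvDownA pattern i col)) := by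
    unfold pvColErrA
    rw [Bool.and_eq_true, Bool.not_eq_true', Bool.not_eq_true', hsw, hsw]
  rw [hA, pv_not_prefix_iff]
  -- lift i to a natural number
  obtain ⟨iN, rfl⟩ : ∃ iN : Nat, i = (iN : Int) := ⟨i.toNat, by omega⟩
  have hn : iN + 1 < pattern.length := by exact_mod_cast (by omega : (iN : Int) + 1 < (pattern.length : Int))
  -- lengths and entries of up and down
  have hupN : ((iN : Int) - -1).toNat = iN + 1 := by omega
  have hdownN : (((pattern.length : Int)) - ((iN : Int) + 1)).toNat = pattern.length - (iN + 1) := by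
    omega
  have hup_len : (pvUpA pattern iN col).length = iN + 1 := by
    unfold pvUpA
    rw [PySem.List.pyRange_neg_one, hupN]
    simp
  have hdown_len : (pvDownA pattern iN col).length = pattern.length - (iN + 1) := by
    unfold pvDownA
    rw [PySem.List.pyRange_one, hdownN]
    simp
  have hup_get : ∀ k : Nat, k < iN + 1 →
      (pvUpA pattern iN col)[k]? = some (pvColCharA pattern ((iN : Int) - k) col) := by
    intro k hk
    unfold pvUpA
    rw [PySem.List.pyRange_neg_one, hupN, List.getElem?_map, List.getElem?_map,
      List.getElem?_range hk]
    rfl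
  have hdown_get : ∀ k : Nat, k < pattern.length - (iN + 1) →
      (pvDownA pattern iN col)[k]? = some (pvColCharA pattern ((iN : Int) + 1 + k) col) := by
    intro k hk
    unfold pvDownA
    rw [PySem.List.pyRange_one, hdownN, List.getElem?_map, List.getElem?_map,
      List.getElem?_range hk]
    rfl
  -- the slices
  have hc : ((iN : Int) + 1) = (((iN + 1 : Nat)) : Int) := by push_cast; ring
  rw [hc, PySem.List.slice_to_natCast, PySem.List.slice_from_natCast]
  -- characters of the rows, as A reads them
  have hchar1 : ∀ (k : Nat) (hh : k < ((pattern.take (iN + 1)).reverse).length),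
      PySem.List.pyGetD (((pattern.take (iN + 1)).reverse)[k]'hh).toList col ' ' =
        pvColCharA pattern ((iN : Int) - k) col := by
    intro k hh
    have hk : k < iN + 1 := by
      rw [List.length_reverse, List.length_take] at hh
      omega
    unfold pvColCharA
    have hidx : (pattern.take (iN + 1)).length - 1 - k = iN - k := by
      rw [List.length_take]
      omega
    rw [List.getElem_reverse, List.getElem_take]
    simp only [hidx]
    have hcast : ((iN : Int) - (k : Int)) = (((iN - k : Nat)) : Int) := by omega
    rw [hcast, PySem.List.pyGetD_natCast]
    congr 1
    rw [List.getD_eq_getElem?_getD, List.getElem?_eq_getElem (by omega)]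
    rfl
  have hchar2 : ∀ (k : Nat) (hh : k < (pattern.drop (iN + 1)).length),
      PySem.List.pyGetD ((pattern.drop (iN + 1))[k]'hh).toList col ' ' =
        pvColCharA pattern ((iN : Int) + 1 + k) col := by
    intro k hh
    have hk : k < pattern.length - (iN + 1) := by
      rw [List.length_drop] at hh
      omega
    unfold pvColCharA
    rw [List.getElem_drop]
    have hcast : ((iN : Int) + 1 + (k : Int)) = (((iN + 1 + k : Nat)) : Int) := by omega
    rw [hcast, PySem.List.pyGetD_natCast]
    congr 1
    rw [List.getD_eq_getElem?_getD, List.getElem?_eq_getElem (by omega)]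
    rfl
  constructor
  · rintro ⟨k, hk, hne⟩
    rw [hup_len, hdown_len] at hk
    have hk1 : k < iN + 1 := by omega
    have hk2 : k < pattern.length - (iN + 1) := by omega
    have hz : k < ((pattern.take (iN + 1)).reverse.zip (pattern.drop (iN + 1))).length := by
      rw [List.length_zip, List.length_reverse, List.length_take, List.length_drop]
      omega
    refine ⟨((pattern.take (iN + 1)).reverse.zip (pattern.drop (iN + 1)))[k]'hz,
      List.getElem_mem hz, ?_⟩
    rw [List.getElem_zip]
    dsimp only
    rw [hdown_get k hk2, hup_get k hk1] at hne
    rw [hchar1 k (by rw [List.length_reverse, List.length_take]; omega),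
        hchar2 k (by rw [List.length_drop]; omega)]
    intro heq2
    exact hne (congrArg some heq2.symm)
  · rintro ⟨ab, hab, hne⟩
    obtain ⟨k, hk, heq⟩ := List.mem_iff_getElem.mp hab
    have hk1 : k < iN + 1 := by
      rw [List.length_zip, List.length_reverse, List.length_take, List.length_drop] at hk
      omega
    have hk2 : k < pattern.length - (iN + 1) := by
      rw [List.length_zip, List.length_reverse, List.length_take, List.length_drop] at hk
      omega
    refine ⟨k, ?_, ?_⟩
    · rw [hup_len, hdown_len]
      omega
    · rw [List.getElem_zip] at heq
      rw [hdown_get k hk2, hup_get k hk1]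
      rw [← heq] at hne
      dsimp only at hne
      rw [hchar1 k (by rw [List.length_reverse, List.length_take]; omega),
          hchar2 k (by rw [List.length_drop]; omega)] at hne
      intro hsome
      injection hsome with hchar
      exact hne hchar.symm

-- per-gap agreement: A's error count equals the size of B's bad-column set
theorem pv_errors_eq (pattern : List String) (i : Int)
    (h0 : 0 ≤ i) (h1 : i < (pattern.length : Int) - 1) :
    pvErrorsA pattern i =
      ((PySem.Set.len (pvBadB pattern ((PySem.Str.len (PySem.List.pyGetD pattern 0 "")) : Int) i)) : Int) := by
  set w : Int := ((PySem.Str.len (PySem.List.pyGetD pattern 0 "")) : Int) with hw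
  unfold pvErrorsA
  rw [← hw, PySem.List.foldl_if_add_one, zero_add]
  have hperm : (pvBadB pattern w i).Perm
      ((PySem.List.pyRange 0 w 1).filter (fun c => pvColErrA pattern i c)) := by
    rw [List.perm_ext_iff_of_nodup (pv_badB_nodup _ _ _)
      ((PySem.List.nodup_pyRange_one _ _).filter _)]
    intro a
    rw [pv_badB_mem, List.mem_filter]
    constructor
    · rintro ⟨ha1, ha2⟩
      exact ⟨ha1, (pv_col_iff pattern i a h0 h1).mpr ha2⟩
    · rintro ⟨ha1, ha2⟩
      exact ⟨ha1, (pv_col_iff pattern i a h0 h1).mp ha2⟩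
  have : PySem.Set.len (pvBadB pattern w i) = (pvBadB pattern w i).length := rfl
  rw [this, hperm.length_eq, ← List.countP_eq_length_filter]

-- the two early-return loops agree gap by gap
theorem pv_go_eq (pattern : List String) (allowedErrors w : Int) (l : List Int)
    (h : ∀ i ∈ l, pvErrorsA pattern i = ((PySem.Set.len (pvBadB pattern w i)) : Int)) :
    pvGoA pattern allowedErrors l = pvGoB pattern allowedErrors w l := by
  induction l with
  | nil => rfl
  | cons i rest ih =>
    simp only [pvGoA, pvGoB]
    rw [← h i (by simp)]
    split_ifs with hcond
    · rfl
    · exact ih (fun j hj => h j (by simp [hj]))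

-- ===== VERDICT (by name: the statement is the Claim_ definition above) =====
theorem isMirrorOnRow_spec : Claim_equal_isMirrorOnRow := by
  intro pattern allowedErrors _hdom _hpre
  unfold Spec_isMirrorOnRow isMirrorOnRow isMirrorOnRow_alt
  by_cases hn : pattern.length < 2
  · rw [if_pos hn, PySem.List.pyRange_one_eq_nil (by
      omega)]
    rfl
  · rw [if_neg hn]
    apply pv_go_eq
    intro i hi
    rw [PySem.List.mem_pyRange_one] at hi
    exact pv_errors_eq pattern i hi.1 (by omega)
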